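-- pv_equiv track=rewrite | github.com/youngfreezy/ai_projects | 2_openai/deep_research/safety_resources.py | get_crisis_resources
-- ===== SOURCE A (Python) =====
-- CRISIS_RESOURCES = {
--     "domestic_violence": {
--         "name": "National Domestic Violence Hotline",
--         "phone": "1-800-799-SAFE (7233)",
--         "website": "https://www.thehotline.org",
--         "available": "24/7, confidential"
--     },
--     "forced_marriage": {
--         "name": "Tahirih Justice Center",
--         "phone": "571-282-6161",
--         "website": "https://www.tahirih.org",
--         "available": "Legal and social services for forced marriage"
--     },
--     "reproductive_rights": {
--         "name": "Reproductive Health Hotline",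
--         "phone": "1-800-230-PLAN",
--         "website": "https://www.plannedparenthood.org",
--         "available": "24/7 health information and support"
--     },
--     "legal_aid_maryland": {
--         "name": "Maryland Legal Aid",
--         "phone": "1-866-635-2948",
--         "website": "https://www.mdlab.org",
--         "available": "Free legal services for eligible Maryland residents"
--     },
--     "emergency": {
--         "name": "Emergency Services",
--         "phone": "911",
--         "available": "Immediate emergency response"
--     }
-- }
--
-- def get_crisis_resources(query: str) -> dict:
--     """Returns relevant crisis resources based on query content."""
--     resources = {}
--
--     # Add emergency resources for immediate danger
--     if any(word in query.lower() for word in ["force", "coerce", "threat", "danger"]):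
--         resources["emergency"] = CRISIS_RESOURCES["emergency"]
--
--     # Add forced marriage resources
--     if any(word in query.lower() for word in ["marriage", "arranged", "forced"]):
--         resources["forced_marriage"] = CRISIS_RESOURCES["forced_marriage"]
--         resources["legal_aid"] = CRISIS_RESOURCES["legal_aid_maryland"]
--
--     # Add reproductive rights resources
--     if any(word in query.lower() for word in ["abortion", "pregnancy"]):
--         resources["reproductive_rights"] = CRISIS_RESOURCES["reproductive_rights"]
--
--     # Add domestic violence resources
--     if any(word in query.lower() for word in ["abuse", "violence", "force", "coerce"]):
--         resources["domestic_violence"] = CRISIS_RESOURCES["domestic_violence"]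
--
--     return resources
-- ===== SOURCE B (Python) =====
-- CRISIS_RESOURCES = {
--     "domestic_violence": {
--         "name": "National Domestic Violence Hotline",
--         "phone": "1-800-799-SAFE (7233)",
--         "website": "https://www.thehotline.org",
--         "available": "24/7, confidential"
--     },
--     "forced_marriage": {
--         "name": "Tahirih Justice Center",
--         "phone": "571-282-6161",
--         "website": "https://www.tahirih.org",
--         "available": "Legal and social services for forced marriage"
--     },
--     "reproductive_rights": {
--         "name": "Reproductive Health Hotline",
--         "phone": "1-800-230-PLAN",
--         "website": "https://www.plannedparenthood.org",
--         "available": "24/7 health information and support"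
--     },
--     "legal_aid_maryland": {
--         "name": "Maryland Legal Aid",
--         "phone": "1-866-635-2948",
--         "website": "https://www.mdlab.org",
--         "available": "Free legal services for eligible Maryland residents"
--     },
--     "emergency": {
--         "name": "Emergency Services",
--         "phone": "911",
--         "available": "Immediate emergency response"
--     }
-- }
--
-- # Inverted index: each trigger word maps to the categories it activates
-- # (each distinct word is searched for in the query exactly once).
-- _TRIGGERS = {
--     "force": ("emergency", "domestic_violence"),
--     "coerce": ("emergency", "domestic_violence"),
--     "threat": ("emergency",),
--     "danger": ("emergency",),
--     "marriage": ("forced_marriage",),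
--     "arranged": ("forced_marriage",),
--     "forced": ("forced_marriage",),
--     "abortion": ("reproductive_rights",),
--     "pregnancy": ("reproductive_rights",),
--     "abuse": ("domestic_violence",),
--     "violence": ("domestic_violence",),
-- }
--
-- # Output slots in their fixed emission order: (output_key, resource_key, gating category).
-- _OUTPUTS = [
--     ("emergency", "emergency", "emergency"),
--     ("forced_marriage", "forced_marriage", "forced_marriage"),
--     ("legal_aid", "legal_aid_maryland", "forced_marriage"),
--     ("reproductive_rights", "reproductive_rights", "reproductive_rights"),
--     ("domestic_violence", "domestic_violence", "domestic_violence"),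
-- ]
--
--
-- def get_crisis_resources(query: str) -> dict:
--     """Returns relevant crisis resources based on query content."""
--     q = query.lower()
--     matched = {cat for word, cats in _TRIGGERS.items() if word in q for cat in cats}
--     return {out_key: CRISIS_RESOURCES[res_key]
--             for out_key, res_key, cat in _OUTPUTS if cat in matched}
-- ===== Notes on version B (the rewrite author's own statement) =====
-- stated objective: alternative
-- what changed: Replaced A's four per-category if-blocks (13 substring tests, query.lower() recomputed per block) by an inverted keyword-to-categories index scanned once (11 distinct words, each tested exactly once) producing a matched-category set, from which the result is emitted as a dict comprehension over a fixed output table.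
import Mathlib
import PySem

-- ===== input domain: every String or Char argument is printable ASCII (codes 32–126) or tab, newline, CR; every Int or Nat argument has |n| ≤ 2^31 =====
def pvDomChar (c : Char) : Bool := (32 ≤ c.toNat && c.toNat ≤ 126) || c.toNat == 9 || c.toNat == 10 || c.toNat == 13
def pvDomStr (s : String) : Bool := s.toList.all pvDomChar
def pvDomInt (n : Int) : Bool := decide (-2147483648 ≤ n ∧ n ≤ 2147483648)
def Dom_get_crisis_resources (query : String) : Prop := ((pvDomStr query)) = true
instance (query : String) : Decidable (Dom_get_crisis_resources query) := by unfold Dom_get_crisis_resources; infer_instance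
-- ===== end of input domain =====

-- B replaces A's four per-category if-blocks (13 substring tests) by an inverted
-- keyword→categories index scanned once (11 distinct words, each tested once) plus a
-- gated comprehension over a fixed output table; same return value everywhere.

-- CRISIS_RESOURCES, shared module-level constant (dict of dicts → assoc lists)
def crisisResources : PySem.Dict String (List (String × String)) :=
  PySem.Dict.ofList
    [ ("domestic_violence",
        [ ("name", "National Domestic Violence Hotline"),
          ("phone", "1-800-799-SAFE (7233)"),
          ("website", "https://www.thehotline.org"),
          ("available", "24/7, confidential") ]),
      ("forced_marriage",
        [ ("name", "Tahirih Justice Center"),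
          ("phone", "571-282-6161"),
          ("website", "https://www.tahirih.org"),
          ("available", "Legal and social services for forced marriage") ]),
      ("reproductive_rights",
        [ ("name", "Reproductive Health Hotline"),
          ("phone", "1-800-230-PLAN"),
          ("website", "https://www.plannedparenthood.org"),
          ("available", "24/7 health information and support") ]),
      ("legal_aid_maryland",
        [ ("name", "Maryland Legal Aid"),
          ("phone", "1-866-635-2948"),
          ("website", "https://www.mdlab.org"),
          ("available", "Free legal services for eligible Maryland residents") ]),
      ("emergency",
        [ ("name", "Emergency Services"),
          ("phone", "911"),
          ("available", "Immediate emergency response") ]) ]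

-- ===== PORT A =====
-- A recomputes query.lower() in each branch; each branch inserts its resource(s).
def get_crisis_resources (query : String) : List (String × List (String × String)) :=
  let resources : PySem.Dict String (List (String × String)) := PySem.Dict.empty
  let resources :=
    if ["force", "coerce", "threat", "danger"].any
        (fun w => PySem.Str.isIn w (PySem.Str.lower query)) then
      resources.insert "emergency" (crisisResources.getD "emergency" [])
    else resources
  let resources :=
    if ["marriage", "arranged", "forced"].any
        (fun w => PySem.Str.isIn w (PySem.Str.lower query)) then
      (resources.insert "forced_marriage" (crisisResources.getD "forced_marriage" [])).insert
        "legal_aid" (crisisResources.getD "legal_aid_maryland" [])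
    else resources
  let resources :=
    if ["abortion", "pregnancy"].any
        (fun w => PySem.Str.isIn w (PySem.Str.lower query)) then
      resources.insert "reproductive_rights" (crisisResources.getD "reproductive_rights" [])
    else resources
  let resources :=
    if ["abuse", "violence", "force", "coerce"].any
        (fun w => PySem.Str.isIn w (PySem.Str.lower query)) then
      resources.insert "domestic_violence" (crisisResources.getD "domestic_violence" [])
    else resources
  resources.items

-- ===== PORT B =====
-- inverted index: trigger word → categories it activates
def crisisTriggers : List (String × List String) :=
  [ ("force", ["emergency", "domestic_violence"]),
    ("coerce", ["emergency", "domestic_violence"]),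
    ("threat", ["emergency"]),
    ("danger", ["emergency"]),
    ("marriage", ["forced_marriage"]),
    ("arranged", ["forced_marriage"]),
    ("forced", ["forced_marriage"]),
    ("abortion", ["reproductive_rights"]),
    ("pregnancy", ["reproductive_rights"]),
    ("abuse", ["domestic_violence"]),
    ("violence", ["domestic_violence"]) ]

-- output slots in emission order: (output_key, resource_key, gating category)
def crisisOutputs : List (String × String × String) :=
  [ ("emergency", "emergency", "emergency"),
    ("forced_marriage", "forced_marriage", "forced_marriage"),
    ("legal_aid", "legal_aid_maryland", "forced_marriage"),
    ("reproductive_rights", "reproductive_rights", "reproductive_rights"),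
    ("domestic_violence", "domestic_violence", "domestic_violence") ]

def get_crisis_resources_alt (query : String) : List (String × List (String × String)) :=
  let q := PySem.Str.lower query
  -- set comprehension: {cat for word, cats in _TRIGGERS.items() if word in q for cat in cats}
  let matched : PySem.Set String :=
    PySem.Set.ofList
      (crisisTriggers.flatMap (fun p => if PySem.Str.isIn p.1 q then p.2 else []))
  -- dict comprehension over the fixed output table, gated by category membership
  (crisisOutputs.foldl
    (fun d t =>
      if PySem.Set.contains matched t.2.2 then
        d.insert t.1 (crisisResources.getD t.2.1 [])
      else d)
    PySem.Dict.empty).items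

-- ===== PRECONDITION & SPEC =====
def Spec_get_crisis_resources (query : String) (out : List (String × List (String × String))) : Prop := out = get_crisis_resources_alt query
instance (query : String) (out : List (String × List (String × String))) : Decidable (Spec_get_crisis_resources query out) := by unfold Spec_get_crisis_resources; infer_instance

-- ===== CLAIM (what is proved, stated in full; the proofs are below) =====
def Claim_equal_get_crisis_resources : Prop := ∀ (query : String), Dom_get_crisis_resources query → Spec_get_crisis_resources query (get_crisis_resources query)

-- ===== LEMMAS AND PROOFS =====

-- Proof-only helpers: each port factored through the Boolean results of its substring tests.
-- AfunGCR mirrors A's four-branch dict build on its 4 branch conditions;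
-- BfunGCR mirrors B's inverted-index build on its 11 per-keyword tests.
def AfunGCR (c1 c2 c3 c4 : Bool) : List (String × List (String × String)) :=
  let resources : PySem.Dict String (List (String × String)) := PySem.Dict.empty
  let resources :=
    if c1 then resources.insert "emergency" (crisisResources.getD "emergency" []) else resources
  let resources :=
    if c2 then
      (resources.insert "forced_marriage" (crisisResources.getD "forced_marriage" [])).insert
        "legal_aid" (crisisResources.getD "legal_aid_maryland" [])
    else resources
  let resources :=
    if c3 then resources.insert "reproductive_rights" (crisisResources.getD "reproductive_rights" [])
    else resources
  let resources :=
    if c4 then resources.insert "domestic_violence" (crisisResources.getD "domestic_violence" [])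
    else resources
  resources.items

def BfunGCR (b1 b2 b3 b4 b5 b6 b7 b8 b9 b10 b11 : Bool) :
    List (String × List (String × String)) :=
  let matched : PySem.Set String :=
    PySem.Set.ofList
      ((if b1 then ["emergency", "domestic_violence"] else []) ++
        ((if b2 then ["emergency", "domestic_violence"] else []) ++
          ((if b3 then ["emergency"] else []) ++
            ((if b4 then ["emergency"] else []) ++
              ((if b5 then ["forced_marriage"] else []) ++
                ((if b6 then ["forced_marriage"] else []) ++
                  ((if b7 then ["forced_marriage"] else []) ++
                    ((if b8 then ["reproductive_rights"] else []) ++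
                      ((if b9 then ["reproductive_rights"] else []) ++
                        ((if b10 then ["domestic_violence"] else []) ++
                          ((if b11 then ["domestic_violence"] else []) ++ ([] : List String))))))))))))
  (crisisOutputs.foldl
    (fun d t =>
      if PySem.Set.contains matched t.2.2 then
        d.insert t.1 (crisisResources.getD t.2.1 [])
      else d)
    PySem.Dict.empty).items

theorem AfunGCR_eq (query : String) :
    get_crisis_resources query =
      AfunGCR
        (PySem.Str.isIn "force" (PySem.Str.lower query) ||
          (PySem.Str.isIn "coerce" (PySem.Str.lower query) ||
            (PySem.Str.isIn "threat" (PySem.Str.lower query) ||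
              (PySem.Str.isIn "danger" (PySem.Str.lower query) || false))))
        (PySem.Str.isIn "marriage" (PySem.Str.lower query) ||
          (PySem.Str.isIn "arranged" (PySem.Str.lower query) ||
            (PySem.Str.isIn "forced" (PySem.Str.lower query) || false)))
        (PySem.Str.isIn "abortion" (PySem.Str.lower query) ||
          (PySem.Str.isIn "pregnancy" (PySem.Str.lower query) || false))
        (PySem.Str.isIn "abuse" (PySem.Str.lower query) ||
          (PySem.Str.isIn "violence" (PySem.Str.lower query) ||
            (PySem.Str.isIn "force" (PySem.Str.lower query) ||
              (PySem.Str.isIn "coerce" (PySem.Str.lower query) || false)))) := rfl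

theorem BfunGCR_eq (query : String) :
    get_crisis_resources_alt query =
      BfunGCR
        (PySem.Str.isIn "force" (PySem.Str.lower query))
        (PySem.Str.isIn "coerce" (PySem.Str.lower query))
        (PySem.Str.isIn "threat" (PySem.Str.lower query))
        (PySem.Str.isIn "danger" (PySem.Str.lower query))
        (PySem.Str.isIn "marriage" (PySem.Str.lower query))
        (PySem.Str.isIn "arranged" (PySem.Str.lower query))
        (PySem.Str.isIn "forced" (PySem.Str.lower query))
        (PySem.Str.isIn "abortion" (PySem.Str.lower query))
        (PySem.Str.isIn "pregnancy" (PySem.Str.lower query))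
        (PySem.Str.isIn "abuse" (PySem.Str.lower query))
        (PySem.Str.isIn "violence" (PySem.Str.lower query)) := rfl

-- the combinatorial core: A's 4 branch conditions vs B's 11 keyword tests, all 2^11 cases
theorem AB_key : ∀ b1 b2 b3 b4 b5 b6 b7 b8 b9 b10 b11 : Bool,
    AfunGCR (b1 || (b2 || (b3 || (b4 || false)))) (b5 || (b6 || (b7 || false)))
        (b8 || (b9 || false)) (b10 || (b11 || (b1 || (b2 || false)))) =
      BfunGCR b1 b2 b3 b4 b5 b6 b7 b8 b9 b10 b11 := by decide

-- ===== VERDICT (by name: the statement is the Claim_ definition above) =====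
theorem get_crisis_resources_spec : Claim_equal_get_crisis_resources := by
  intro query _
  unfold Spec_get_crisis_resources
  rw [AfunGCR_eq query, BfunGCR_eq query]
  exact AB_key _ _ _ _ _ _ _ _ _ _ _
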